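-- pv_equiv track=rewrite | github.com/RezaRfahi/building-price | webdata.py | build
-- ===== SOURCE A (Python) =====
-- def build(lis):
--     cunt=1
--     attrs=[]
--     varlist=[]
--     listcount=0
--     for i in lis:
--         if cunt%3!=0:
--             varlist.append(int(i))
--             listcount=listcount+1
--             if listcount==2:
--                 attrs.append(varlist)
--                 listcount=0
--                 varlist=[]
--         cunt=cunt+1
--     return attrs
-- ===== SOURCE B (Python) =====
-- def build(lis):
--     # two phases: filter+convert the kept elements (index % 3 != 2), then pair them up
--     filtered = [int(v) for i, v in enumerate(lis) if i % 3 != 2]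
--     it = iter(filtered)
--     return [[a, b] for a, b in zip(it, it)]
-- ===== Notes on version B (the rewrite author's own statement) =====
-- stated objective: simpler
-- what changed: Replaces A's single stateful loop with four counters by two stateless phases: a comprehension filtering/converting the kept elements (0-based index % 3 != 2), then pairing that flat list two at a time.
import Mathlib
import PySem

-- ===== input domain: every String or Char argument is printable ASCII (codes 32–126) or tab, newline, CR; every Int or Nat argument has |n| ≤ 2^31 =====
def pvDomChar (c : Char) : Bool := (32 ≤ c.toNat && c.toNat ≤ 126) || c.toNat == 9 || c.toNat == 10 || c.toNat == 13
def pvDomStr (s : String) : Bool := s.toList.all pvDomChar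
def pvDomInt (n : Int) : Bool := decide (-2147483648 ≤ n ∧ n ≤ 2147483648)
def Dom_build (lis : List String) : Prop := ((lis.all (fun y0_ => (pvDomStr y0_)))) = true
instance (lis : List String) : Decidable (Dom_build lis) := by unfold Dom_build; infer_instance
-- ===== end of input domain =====

-- B splits A's single stateful loop into a filter/convert phase and a pairing phase (objective: simpler).

-- ===== PORT A =====
-- state: (cunt, attrs, varlist, listcount); int(i) is PySem.Int.ofStr?,
-- the .getD 0 arm is unreachable inside Pre_build (Pre_ excludes ValueError inputs).
def build (lis : List String) : List (List Int) :=
  let s := lis.foldl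
    (fun (st : Int × List (List Int) × List Int × Int) i =>
      let (cunt, attrs, varlist, listcount) := st
      if cunt % 3 ≠ 0 then
        let varlist := varlist ++ [(PySem.Int.ofStr? i).getD 0]
        let listcount := listcount + 1
        if listcount = 2 then (cunt + 1, attrs ++ [varlist], ([] : List Int), (0 : Int))
        else (cunt + 1, attrs, varlist, listcount)
      else (cunt + 1, attrs, varlist, listcount))
    (1, [], [], 0)
  s.2.1

-- ===== PORT B =====
-- pairing phase of Source B: zip(it, it) over the filtered list, i.e. take two at a time, drop a leftover
def pairUp : List Int → List (List Int)
  | a :: b :: t => [a, b] :: pairUp t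
  | _ => []

def build_alt (lis : List String) : List (List Int) :=
  let filtered := (PySem.List.enumerate lis).filterMap
    (fun p => if p.1 % 3 = 2 then none else some ((PySem.Int.ofStr? p.2).getD 0))
  pairUp filtered

-- ===== PRECONDITION & SPEC =====
-- Pre_ excludes exactly the inputs where Python's int() raises ValueError on a kept element
-- (0-based index % 3 ≠ 2); both A and B raise there.
def Pre_build (lis : List String) : Prop :=
  ∀ p ∈ PySem.List.enumerate lis, p.1 % 3 = 2 ∨ (PySem.Int.ofStr? p.2).isSome
instance (lis : List String) : Decidable (Pre_build lis) := by unfold Pre_build; infer_instance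

def pvWitness_build : List String := ["42", "  6", "0", "5 ", " 7 ", "-13", "9"]

def Spec_build (lis : List String) (out : List (List Int)) : Prop := out = build_alt lis
instance (lis : List String) (out : List (List Int)) : Decidable (Spec_build lis out) := by unfold Spec_build; infer_instance

-- ===== CLAIM (what is proved, stated in full; the proofs are below) =====
def Claim_equal_build : Prop := ∀ (lis : List String), Dom_build lis → Pre_build lis → Spec_build lis (build lis)

-- ===== LEMMAS AND PROOFS =====

-- the kept, converted elements when the next 1-based counter is c
def kept : Int → List String → List Int
  | _, [] => []
  | c, x :: t => if c % 3 = 0 then kept (c + 1) t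
                 else (PySem.Int.ofStr? x).getD 0 :: kept (c + 1) t

lemma loopA (lis : List String) : ∀ (cunt : Int) (attrs : List (List Int)) (varlist : List Int),
    varlist.length ≤ 1 →
    (lis.foldl
      (fun (st : Int × List (List Int) × List Int × Int) i =>
        let (cunt, attrs, varlist, listcount) := st
        if cunt % 3 ≠ 0 then
          let varlist := varlist ++ [(PySem.Int.ofStr? i).getD 0]
          let listcount := listcount + 1
          if listcount = 2 then (cunt + 1, attrs ++ [varlist], ([] : List Int), (0 : Int))
          else (cunt + 1, attrs, varlist, listcount)
        else (cunt + 1, attrs, varlist, listcount))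
      (cunt, attrs, varlist, (varlist.length : Int))).2.1
    = attrs ++ pairUp (varlist ++ kept cunt lis) := by
  induction lis with
  | nil =>
    intro cunt attrs varlist hlen
    match varlist, hlen with
    | [], _ => simp [kept, pairUp]
    | [a], _ => simp [kept, pairUp]
  | cons x t ih =>
    intro cunt attrs varlist hlen
    by_cases h3 : cunt % 3 = 0
    · simpa [List.foldl, h3, kept] using ih (cunt + 1) attrs varlist hlen
    · match varlist, hlen with
      | [], _ =>
        have := ih (cunt + 1) attrs [(PySem.Int.ofStr? x).getD 0] (by simp)
        simpa [List.foldl, h3, kept] using this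
      | [a], _ =>
        have := ih (cunt + 1) (attrs ++ [[a, (PySem.Int.ofStr? x).getD 0]]) [] (by simp)
        simpa [List.foldl, h3, kept, pairUp] using this

lemma keptB (lis : List String) : ∀ (c : Int),
    (PySem.List.enumerate lis c).filterMap
      (fun p => if p.1 % 3 = 2 then none else some ((PySem.Int.ofStr? p.2).getD 0))
    = kept (c + 1) lis := by
  induction lis with
  | nil => intro c; simp [kept, PySem.List.enumerate_nil]
  | cons x t ih =>
    intro c
    rw [PySem.List.enumerate_cons]
    by_cases h : c % 3 = 2
    · have h' : (c + 1) % 3 = 0 := by omega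
      simp [h, kept, h', ih (c + 1)]
    · have h' : ¬ (c + 1) % 3 = 0 := by omega
      simp [h, kept, h', ih (c + 1)]

-- ===== VERDICT (by name: the statement is the Claim_ definition above) =====
theorem build_spec : Claim_equal_build := by
  intro lis _ _
  unfold Spec_build build build_alt
  rw [keptB lis 0]
  simpa using loopA lis 1 [] [] (by simp)
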